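-- pv_equiv track=rewrite | github.com/Lynette04/leety | unplacedfruits.py | unplacedfruit
-- ===== SOURCE A (Python) =====
-- def unplacedfruit(fruits,baskets):
--     unplacedcount = 0
--     n=len(fruits)
--     used_basket=[False]*n
--
--     for i in range(n):
--         placed=False
--         for j in range(n):
--             if not used_basket[j] and baskets[j] >= fruits[i] :
--                 used_basket[j]=True
--                 placed = True
--                 break
--         if not placed:
--             unplacedcount+=1
--     return unplacedcount
-- ===== SOURCE B (Python) =====
-- # Segment-tree (max, persistent) leftmost-fit per fruit: O(n log n) instead of A's O(n^2) rescans.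
-- # Like A, only the first len(fruits) baskets are considered.
--
-- def _omax(a, b):
--     if a is None:
--         return b
--     if b is None:
--         return a
--     return max(a, b)
--
-- def _mx(t):
--     return t[1] if t[0] == 'leaf' else t[2]
--
-- def _build(xs):
--     if len(xs) <= 1:
--         return ('leaf', xs[0] if xs else None)
--     k = len(xs) // 2
--     l = _build(xs[:k])
--     r = _build(xs[k:])
--     return ('node', k, _omax(_mx(l), _mx(r)), l, r)
--
-- def _query(t, f):
--     # leftmost index whose capacity is >= f, or None
--     if t[0] == 'leaf':
--         c = t[1]
--         return 0 if (c is not None and c >= f) else None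
--     _, k, mx, l, r = t
--     if mx is None or mx < f:
--         return None
--     i = _query(l, f)
--     if i is not None:
--         return i
--     i = _query(r, f)
--     return None if i is None else i + k
--
-- def _update(t, i):
--     # mark slot i as used (capacity -> None)
--     if t[0] == 'leaf':
--         return ('leaf', None)
--     _, k, mx, l, r = t
--     if i < k:
--         l = _update(l, i)
--     else:
--         r = _update(r, i - k)
--     return ('node', k, _omax(_mx(l), _mx(r)), l, r)
--
-- def unplacedfruit(fruits, baskets):
--     tree = _build(baskets[:len(fruits)])
--     count = 0
--     for f in fruits:
--         j = _query(tree, f)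
--         if j is None:
--             count += 1
--         else:
--             tree = _update(tree, j)
--     return count
-- ===== Notes on version B (the rewrite author's own statement) =====
-- stated objective: faster
-- what changed: Replaces A's per-fruit linear rescan of the used-flags array with a persistent max-segment tree over the first len(fruits) basket capacities, answering each leftmost-fit query and deletion in O(log n).
import Mathlib
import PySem

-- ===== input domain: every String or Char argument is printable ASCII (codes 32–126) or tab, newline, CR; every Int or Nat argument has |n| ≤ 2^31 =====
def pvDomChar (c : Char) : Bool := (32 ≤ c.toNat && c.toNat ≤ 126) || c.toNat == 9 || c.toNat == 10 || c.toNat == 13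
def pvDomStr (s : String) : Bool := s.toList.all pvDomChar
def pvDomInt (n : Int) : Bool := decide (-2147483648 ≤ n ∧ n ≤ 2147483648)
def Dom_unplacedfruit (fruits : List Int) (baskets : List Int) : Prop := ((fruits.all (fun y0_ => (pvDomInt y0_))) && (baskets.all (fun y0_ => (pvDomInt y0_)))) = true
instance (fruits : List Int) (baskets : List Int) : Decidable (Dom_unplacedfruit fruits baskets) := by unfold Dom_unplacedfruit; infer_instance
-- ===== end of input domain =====

-- B replaces A's per-fruit linear rescan with a persistent max-segment tree over the first
-- len(fruits) basket capacities (leftmost-fit query + deletion in O(log n)); objective: faster.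

-- ===== PORT A =====
-- inner loop: for j in range(n): if not used_basket[j] and baskets[j] >= f: mark, break
def pvAInner (baskets : List Int) (f : Int) (used : List Bool) (n : Nat) (j : Nat) : Option Nat :=
  if _h : j < n then
    if !(PySem.List.pyGetD used (j : Int) false) && decide (PySem.List.pyGetD baskets (j : Int) 0 ≥ f) then
      some j
    else
      pvAInner baskets f used n (j + 1)
  else none
termination_by n - j

-- outer loop over the fruits, carrying used_basket and unplacedcount
def pvAOuter (baskets : List Int) (n : Nat) : List Int → List Bool → Int → Int
  | [], _, cnt => cnt
  | f :: rest, used, cnt =>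
    match pvAInner baskets f used n 0 with
    | some j => pvAOuter baskets n rest (used.set j true) cnt
    | none => pvAOuter baskets n rest used (cnt + 1)

def unplacedfruit (fruits : List Int) (baskets : List Int) : Int :=
  pvAOuter baskets fruits.length fruits (List.replicate fruits.length false) 0

-- ===== PORT B =====
inductive pvTree where
  | leaf (c : Option Int)
  | node (szL : Nat) (mx : Option Int) (l : pvTree) (r : pvTree)
deriving Repr

def pvOmax (a b : Option Int) : Option Int :=
  match a, b with
  | none, b => b
  | some x, none => some x
  | some x, some y => some (max x y)

def pvTree.mx : pvTree → Option Int
  | .leaf c => c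
  | .node _ m _ _ => m

-- _build; the fuel argument (length of the list suffices) only makes the recursion structural
def pvBuildF (fuel : Nat) (xs : List Int) : pvTree :=
  match fuel with
  | 0 => .leaf xs.head?
  | fuel + 1 =>
    if xs.length ≤ 1 then .leaf xs.head?
    else
      let k := xs.length / 2
      let l := pvBuildF fuel (xs.take k)
      let r := pvBuildF fuel (xs.drop k)
      .node k (pvOmax l.mx r.mx) l r

def pvBuild (xs : List Int) : pvTree := pvBuildF xs.length xs

-- _query: leftmost index whose capacity is >= f
def pvQuery : pvTree → Int → Option Nat
  | .leaf c, f => if c.any (fun x => decide (f ≤ x)) then some 0 else none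
  | .node szL mx l r, f =>
    if mx.any (fun x => decide (f ≤ x)) then
      match pvQuery l f with
      | some i => some i
      | none => (pvQuery r f).map (· + szL)
    else none

-- _update: mark slot i as used (capacity -> none)
def pvUpdate : pvTree → Nat → pvTree
  | .leaf _, _ => .leaf none
  | .node szL _ l r, i =>
    if i < szL then
      let l' := pvUpdate l i
      .node szL (pvOmax l'.mx r.mx) l' r
    else
      let r' := pvUpdate r (i - szL)
      .node szL (pvOmax l.mx r'.mx) l r'

def pvBGo : pvTree → List Int → Int → Int
  | _, [], cnt => cnt
  | t, f :: rest, cnt =>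
    match pvQuery t f with
    | some j => pvBGo (pvUpdate t j) rest cnt
    | none => pvBGo t rest (cnt + 1)

def unplacedfruit_alt (fruits : List Int) (baskets : List Int) : Int :=
  pvBGo (pvBuild (baskets.take fruits.length)) fruits 0

-- ===== PRECONDITION & SPEC =====
-- Pre_ excludes exactly the inputs where A raises IndexError: when len(baskets) < len(fruits)
-- (and fruits ≠ []) some fruit exhausts all real baskets and A reads baskets[len(baskets)].
def Pre_unplacedfruit (fruits : List Int) (baskets : List Int) : Prop :=
  fruits.length ≤ baskets.length
instance (fruits : List Int) (baskets : List Int) : Decidable (Pre_unplacedfruit fruits baskets) := by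
  unfold Pre_unplacedfruit; infer_instance

def pvWitness_unplacedfruit : List Int × List Int := ([3, 1, 2], [2, 3, 4])

def Spec_unplacedfruit (fruits : List Int) (baskets : List Int) (out : Int) : Prop :=
  out = unplacedfruit_alt fruits baskets
instance (fruits : List Int) (baskets : List Int) (out : Int) : Decidable (Spec_unplacedfruit fruits baskets out) := by
  unfold Spec_unplacedfruit; infer_instance

-- ===== CLAIM (what is proved, stated in full; the proofs are below) =====
def Claim_equal_unplacedfruit : Prop := ∀ (fruits : List Int) (baskets : List Int), Dom_unplacedfruit fruits baskets → Pre_unplacedfruit fruits baskets → Spec_unplacedfruit fruits baskets (unplacedfruit fruits baskets)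

-- ===== LEMMAS AND PROOFS =====

-- the list of current capacities a tree represents (none = used / no capacity)
def pvToList : pvTree → List (Option Int)
  | .leaf c => [c]
  | .node _ _ l r => pvToList l ++ pvToList r

def pvListMax (l : List (Option Int)) : Option Int := l.foldr pvOmax none

-- well-formedness: stored split sizes and maxima are correct
def pvWF : pvTree → Prop
  | .leaf _ => True
  | .node szL mx l r => szL = (pvToList l).length ∧ mx = pvOmax l.mx r.mx ∧ pvWF l ∧ pvWF r

-- mask of the used flags over the capacities
def pvMask (used : List Bool) (bs : List Int) : List (Option Int) :=
  List.zipWith (fun u b => if u then none else some b) used bs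

def pvP (f : Int) : Option Int → Bool := fun o => o.any (fun x => decide (f ≤ x))

theorem pvOmax_any (f : Int) (a b : Option Int) :
    pvP f (pvOmax a b) = (pvP f a || pvP f b) := by
  rcases a with _ | x <;> rcases b with _ | y <;>
    simp [pvOmax, pvP]

theorem pvListMax_append (l₁ l₂ : List (Option Int)) :
    pvListMax (l₁ ++ l₂) = pvOmax (pvListMax l₁) (pvListMax l₂) := by
  induction l₁ with
  | nil => rfl
  | cons a t ih =>
    show pvOmax a (pvListMax (t ++ l₂)) = pvOmax (pvOmax a (pvListMax t)) (pvListMax l₂)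
    rw [ih]
    rcases a with _ | x <;> rcases pvListMax t with _ | y <;>
      rcases pvListMax l₂ with _ | z <;>
      simp [pvOmax, max_assoc]

theorem pvListMax_any (f : Int) (l : List (Option Int)) :
    pvP f (pvListMax l) = l.any (pvP f) := by
  induction l with
  | nil => simp [pvListMax, pvP]
  | cons a t ih =>
    have h : pvListMax (a :: t) = pvOmax a (pvListMax t) := rfl
    rw [List.any_cons, h, pvOmax_any, ih]

theorem pvWF_mx (t : pvTree) (h : pvWF t) : t.mx = pvListMax (pvToList t) := by
  induction t with
  | leaf c => cases c <;> rfl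
  | node szL mx l r ihl ihr =>
    obtain ⟨-, hmx, hl, hr⟩ := h
    show mx = pvListMax (pvToList l ++ pvToList r)
    rw [hmx, ihl hl, ihr hr, pvListMax_append]

theorem pvQuery_correct (t : pvTree) (f : Int) (h : pvWF t) :
    pvQuery t f = (pvToList t).findIdx? (pvP f) := by
  induction t with
  | leaf c =>
    rcases c with _ | x
    · simp [pvQuery, pvToList, pvP, List.findIdx?_cons]
    · by_cases hfx : f ≤ x <;>
        simp [pvQuery, pvToList, pvP, List.findIdx?_cons, hfx]
  | node szL mx l r ihl ihr =>
    obtain ⟨hsz, hmx, hl, hr⟩ := h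
    simp only [pvQuery, pvToList, List.findIdx?_append]
    by_cases hp : (mx.any (fun x => decide (f ≤ x))) = true
    · simp only [hp, if_true, ihl hl, ihr hr, hsz]
      cases hfl : (pvToList l).findIdx? (pvP f) <;> simp [Option.or]
    · simp only [hp, if_false, Bool.false_eq_true]
      have hmx' : pvP f mx = false := by simpa [pvP] using hp
      rw [hmx, pvOmax_any, pvWF_mx l hl, pvWF_mx r hr, pvListMax_any, pvListMax_any] at hmx'
      obtain ⟨ha, hb⟩ := Bool.or_eq_false_iff.mp hmx'
      have h1 : (pvToList l).findIdx? (pvP f) = none := by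
        rw [List.findIdx?_eq_none_iff]
        intro x hx
        simpa using List.any_eq_false.mp ha x hx
      have h2 : (pvToList r).findIdx? (pvP f) = none := by
        rw [List.findIdx?_eq_none_iff]
        intro x hx
        simpa using List.any_eq_false.mp hb x hx
      simp [h1, h2, Option.or]

theorem pvUpdate_correct (t : pvTree) (i : Nat) (h : pvWF t) (hi : i < (pvToList t).length) :
    pvToList (pvUpdate t i) = (pvToList t).set i none ∧ pvWF (pvUpdate t i) := by
  induction t generalizing i with
  | leaf c =>
    have hi1 : i < 1 := by simpa [pvToList] using hi
    have hi0 : i = 0 := by omega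
    subst hi0
    simp [pvUpdate, pvToList, pvWF]
  | node szL mx l r ihl ihr =>
    obtain ⟨hsz, hmx, hl, hr⟩ := h
    simp only [pvToList, List.length_append] at hi
    by_cases hc : i < szL
    · obtain ⟨hL1, hL2⟩ := ihl hl (i := i) (by omega)
      simp only [pvUpdate, hc, if_true, pvToList]
      refine ⟨?_, ?_⟩
      · rw [hL1, List.set_append_left _ _ (by omega)]
      · exact ⟨by rw [hL1]; simp [hsz], rfl, hL2, hr⟩
    · obtain ⟨hR1, hR2⟩ := ihr hr (i := i - szL) (by omega)
      simp only [pvUpdate, hc, if_false, pvToList]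
      refine ⟨?_, ?_⟩
      · rw [hR1, List.set_append_right _ _ (by omega), hsz]
      · exact ⟨hsz, rfl, hl, hR2⟩

theorem pvBuildF_correct (fuel : Nat) (xs : List Int) (hne : xs ≠ [])
    (hf : xs.length ≤ fuel) :
    pvToList (pvBuildF fuel xs) = xs.map some ∧ pvWF (pvBuildF fuel xs) := by
  induction fuel generalizing xs with
  | zero =>
    exact absurd (List.length_eq_zero_iff.mp (by omega)) hne
  | succ fuel ih =>
    rw [pvBuildF]
    by_cases h1 : xs.length ≤ 1
    · match xs, hne with
      | [a], _ => simp [pvToList, pvWF]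
      | a :: b :: t, _ => simp at h1
    · simp only [h1, if_false]
      have hk : 1 ≤ xs.length / 2 ∧ xs.length / 2 < xs.length := by omega
      obtain ⟨hT1, hT2⟩ := ih (xs.take (xs.length / 2))
        (by rw [← List.length_pos_iff]; simp; omega) (by simp; omega)
      obtain ⟨hD1, hD2⟩ := ih (xs.drop (xs.length / 2))
        (by rw [← List.length_pos_iff]; simp; omega) (by simp; omega)
      refine ⟨?_, ?_⟩
      · simp only [pvToList, hT1, hD1, ← List.map_append, List.take_append_drop]
      · refine ⟨?_, rfl, hT2, hD2⟩
        rw [hT1]; simp; omega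

-- A's inner scan equals findIdx? over the masked capacities
theorem pvAInner_correct (baskets : List Int) (f : Int) (used : List Bool) (n j : Nat)
    (hu : used.length = n) (hb : n ≤ baskets.length) :
    pvAInner baskets f used n j =
      (((pvMask used (baskets.take n)).drop j).findIdx? (pvP f)).map (· + j) := by
  have hmlen : (pvMask used (baskets.take n)).length = n := by
    simp [pvMask, hu]; omega
  induction hfuel : n - j using Nat.strong_induction_on generalizing j with
  | _ fuel ih =>
    rw [pvAInner]
    by_cases hj : j < n
    · simp only [hj, dif_pos]
      have hjb : j < baskets.length := by omega
      have hdrop : (pvMask used (baskets.take n)).drop j =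
          (pvMask used (baskets.take n))[j]'(by omega) :: (pvMask used (baskets.take n)).drop (j + 1) :=
        List.drop_eq_getElem_cons (by omega)
      have hget : (pvMask used (baskets.take n))[j]'(by omega) =
          if used[j]'(by omega) then none else some (baskets[j]'hjb) := by
        simp [pvMask]
      have hcond : (!(PySem.List.pyGetD used (j : Int) false) &&
          decide (PySem.List.pyGetD baskets (j : Int) 0 ≥ f)) =
          pvP f ((pvMask used (baskets.take n))[j]'(by omega)) := by
        rw [hget, PySem.List.pyGetD_natCast, PySem.List.pyGetD_natCast,
          List.getD_eq_getElem _ _ (by omega), List.getD_eq_getElem _ _ hjb]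
        by_cases hused : used[j]'(by omega) = true <;> simp [hused, pvP, ge_iff_le]
      rw [hdrop, List.findIdx?_cons, ← hcond]
      cases hc : (!(PySem.List.pyGetD used (j : Int) false) &&
          decide (PySem.List.pyGetD baskets (j : Int) 0 ≥ f)) with
      | true => simp
      | false =>
        simp only [Bool.false_eq_true, if_false]
        rw [ih (n - (j + 1)) (by omega) (j + 1) rfl, Option.map_map]
        congr 1
        funext x
        simp only [Function.comp_apply]
        omega
    · simp only [hj, dif_neg, not_false_iff]
      rw [List.drop_eq_nil_of_le (by omega)]
      simp

-- setting a used flag sets the masked entry to none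
theorem pvMask_set (used : List Bool) (bs : List Int) (j : Nat)
    (hj : j < used.length) (hjb : j < bs.length) :
    pvMask (used.set j true) bs = (pvMask used bs).set j none := by
  induction used generalizing bs j with
  | nil => simp at hj
  | cons u ut ih =>
    cases bs with
    | nil => simp at hjb
    | cons b bt =>
      cases j with
      | zero => simp [pvMask]
      | succ j =>
        simp only [List.length_cons] at hj hjb
        simp only [pvMask, List.zipWith_cons_cons, List.set_cons_succ]
        exact congrArg (List.cons _) (ih bt j (by omega) (by omega))

-- main loop invariant: A's flag-scan loop equals B's tree loop
theorem pvLoop_eq (baskets : List Int) (n : Nat) (hb : n ≤ baskets.length)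
    (fruits : List Int) (used : List Bool) (t : pvTree) (cnt : Int)
    (hu : used.length = n) (hwf : pvWF t) (ht : pvToList t = pvMask used (baskets.take n)) :
    pvAOuter baskets n fruits used cnt = pvBGo t fruits cnt := by
  induction fruits generalizing used t cnt with
  | nil => rfl
  | cons f rest ih =>
    have hmlen : (pvMask used (baskets.take n)).length = n := by
      simp [pvMask, hu]; omega
    have hq : pvQuery t f = (pvMask used (baskets.take n)).findIdx? (pvP f) := by
      rw [pvQuery_correct t f hwf, ht]
    have hA : pvAInner baskets f used n 0 = (pvMask used (baskets.take n)).findIdx? (pvP f) := by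
      rw [pvAInner_correct baskets f used n 0 hu hb]
      simp
    simp only [pvAOuter, pvBGo, hA, hq]
    cases hfi : (pvMask used (baskets.take n)).findIdx? (pvP f) with
    | none => exact ih used t (cnt + 1) hu hwf ht
    | some j =>
      have hjn : j < n := by
        have := (List.findIdx?_eq_some_iff_findIdx_eq.mp hfi).1
        omega
      obtain ⟨hU1, hU2⟩ := pvUpdate_correct t j hwf (by rw [ht]; omega)
      refine ih (used.set j true) (pvUpdate t j) cnt (by simp [hu]) hU2 ?_
      rw [hU1, ht, pvMask_set used _ j (by omega) (by simp; omega)]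

theorem pvMask_replicate (bs : List Int) :
    pvMask (List.replicate bs.length false) bs = bs.map some := by
  induction bs with
  | nil => rfl
  | cons b t ih =>
    simp only [List.length_cons, List.replicate_succ, pvMask, List.zipWith_cons_cons,
      List.map_cons, Bool.false_eq_true, if_false]
    exact congrArg _ ih

-- ===== VERDICT (by name: the statement is the Claim_ definition above) =====
theorem unplacedfruit_spec : Claim_equal_unplacedfruit := by
  intro fruits baskets _ hpre
  unfold Pre_unplacedfruit at hpre
  unfold Spec_unplacedfruit unplacedfruit unplacedfruit_alt pvBuild
  cases fruits with
  | nil => rfl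
  | cons f rest =>
    have hlt : (baskets.take (f :: rest).length).length = (f :: rest).length := by
      simp only [List.length_take]
      omega
    have hne : baskets.take (f :: rest).length ≠ [] := by
      rw [← List.length_pos_iff, hlt]; simp
    obtain ⟨hB1, hB2⟩ := pvBuildF_correct (baskets.take (f :: rest).length).length
      (baskets.take (f :: rest).length) hne (le_refl _)
    refine pvLoop_eq baskets (f :: rest).length hpre (f :: rest)
      (List.replicate (f :: rest).length false) _ 0 (by simp) hB2 ?_
    rw [hB1]
    have hmr := pvMask_replicate (baskets.take (f :: rest).length)
    rw [hlt] at hmr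
    exact hmr.symm
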